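-- pv_equiv track=rewrite | github.com/joaoflavioufmg/sls | 00-Suplementary-Material-Python-Course/16-Generators.py | k_permutacoes
-- ===== SOURCE A (Python) =====
-- def k_permutacoes(itens, n):
--     if n == 0:
--         yield []
--     else:
--         for i in itens:
--             for kp in k_permutacoes(itens, n-1):
--                 if i not in kp:
--                     yield [i] + kp
-- ===== SOURCE B (Python) =====
-- def k_permutacoes(itens, n):
--     def go(prefix):
--         if len(prefix) == n:
--             yield prefix
--         else:
--             for i in itens:
--                 if i not in prefix:
--                     yield from go(prefix + [i])
--     yield from go([])
-- ===== Notes on version B (the rewrite author's own statement) =====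
-- stated objective: alternative
-- what changed: B replaces A's regenerate-and-filter recursion (which recomputes all (n-1)-permutations of the full list for every outer item and discards those containing it) by a forward backtracking DFS that threads the growing prefix and only extends with unused items; it avoids A's recomputation but the run time of both is dominated by the size of the output.
import Mathlib
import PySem

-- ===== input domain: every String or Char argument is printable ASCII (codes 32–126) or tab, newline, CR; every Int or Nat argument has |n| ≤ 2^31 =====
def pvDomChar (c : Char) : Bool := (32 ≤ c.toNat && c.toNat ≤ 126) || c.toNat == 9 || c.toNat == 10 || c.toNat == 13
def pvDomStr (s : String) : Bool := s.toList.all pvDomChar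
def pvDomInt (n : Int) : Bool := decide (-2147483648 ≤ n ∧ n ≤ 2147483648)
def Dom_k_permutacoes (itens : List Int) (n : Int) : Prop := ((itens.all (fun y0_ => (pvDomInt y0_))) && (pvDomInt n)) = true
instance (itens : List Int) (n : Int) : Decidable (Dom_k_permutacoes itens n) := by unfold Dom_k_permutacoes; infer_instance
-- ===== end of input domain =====

-- B replaces A's regenerate-and-filter recursion by a forward backtracking DFS threading
-- the growing prefix (an alternative algorithm; both run times are dominated by the output size).

-- ===== PORT A =====
-- A: if n == 0: yield []; else for i in itens: for kp in rec(itens, n-1): if i not in kp: yield [i]+kp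
-- The 'n < 0' branch is a totality guard only: Python recurses forever there (excluded by Pre_).
def k_permutacoes (itens : List Int) (n : Int) : List (List Int) :=
  if n = 0 then [[]]
  else if n < 0 then []
  else itens.flatMap (fun i =>
    ((k_permutacoes itens (n - 1)).filter (fun kp => !decide (i ∈ kp))).map (fun kp => i :: kp))
termination_by n.toNat
decreasing_by omega

-- ===== PORT B =====
-- B's inner generator 'go(prefix)': if len(prefix)==n: yield prefix; else for i in itens:
--   if i not in prefix: yield from go(prefix+[i])
def k_permutacoes_go (itens : List Int) (n : Int) (pre : List Int) : List (List Int) :=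
  if (pre.length : Int) = n then [pre]
  else itens.attach.flatMap (fun i =>
    if i.1 ∈ pre then [] else k_permutacoes_go itens n (pre ++ [i.1]))
termination_by (itens.filter (fun x => !decide (x ∈ pre))).length
decreasing_by
  rename_i h
  have hsub : List.Sublist (itens.filter (fun x => !decide (x ∈ pre ++ [i.1])))
      (itens.filter (fun x => !decide (x ∈ pre))) := by
    apply List.monotone_filter_right
    intro a ha
    simp only [List.mem_append, List.mem_singleton, Bool.not_eq_eq_eq_not, Bool.not_true,
      decide_eq_false_iff_not] at ha ⊢
    exact fun hm => ha (Or.inl hm)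
  have hle := hsub.length_le
  rcases Nat.lt_or_ge (itens.filter (fun x => !decide (x ∈ pre ++ [i.1]))).length
      (itens.filter (fun x => !decide (x ∈ pre))).length with hlt | hge
  · exact hlt
  · exfalso
    have heq : itens.filter (fun x => !decide (x ∈ pre ++ [i.1])) =
        itens.filter (fun x => !decide (x ∈ pre)) :=
      hsub.eq_of_length (Nat.le_antisymm hle hge)
    have hi1 : i.1 ∈ itens.filter (fun x => !decide (x ∈ pre)) := by
      simp only [List.mem_filter, Bool.not_eq_eq_eq_not, Bool.not_true, decide_eq_false_iff_not]
      exact ⟨i.2, h⟩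
    rw [← heq] at hi1
    simp at hi1

def k_permutacoes_alt (itens : List Int) (n : Int) : List (List Int) :=
  k_permutacoes_go itens n []

-- ===== PRECONDITION & SPEC =====
-- Pre_ excludes exactly n < 0, where Python A recurses without bound (RecursionError).
def Pre_k_permutacoes (itens : List Int) (n : Int) : Prop := 0 ≤ n
instance (itens : List Int) (n : Int) : Decidable (Pre_k_permutacoes itens n) := by unfold Pre_k_permutacoes; infer_instance
def pvWitness_k_permutacoes : List Int × Int := ([1, 2, 3], 2)

def Spec_k_permutacoes (itens : List Int) (n : Int) (out : List (List Int)) : Prop := out = k_permutacoes_alt itens n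
instance (itens : List Int) (n : Int) (out : List (List Int)) : Decidable (Spec_k_permutacoes itens n out) := by unfold Spec_k_permutacoes; infer_instance

-- ===== CLAIM (what is proved, stated in full; the proofs are below) =====
def Claim_equal_k_permutacoes : Prop := ∀ (itens : List Int) (n : Int), Dom_k_permutacoes itens n → Pre_k_permutacoes itens n → Spec_k_permutacoes itens n (k_permutacoes itens n)
-- ===== LEMMAS AND PROOFS =====

lemma flatMap_attach_val {α β : Type} (l : List α) (f : α → List β) :
    l.attach.flatMap (fun x => f x.1) = l.flatMap f := by
  rw [List.flatMap_def, List.flatMap_def]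
  congr 1
  rw [show (fun (x : {x // x ∈ l}) => f x.1) = f ∘ Subtype.val from rfl, ← List.map_map, List.attach_map_subtype_val]

lemma go_eq (itens : List Int) (n : Int) :
    ∀ (k : Nat) (pre : List Int), (pre.length : Int) + k = n →
      k_permutacoes_go itens n pre =
        ((k_permutacoes itens k).filter
            (fun kp => pre.all (fun p => !decide (p ∈ kp)))).map (fun kp => pre ++ kp) := by
  intro k
  induction k with
  | zero =>
    intro pre hlen
    rw [k_permutacoes_go.eq_def]
    rw [if_pos (by omega)]
    rw [k_permutacoes.eq_def]
    simp
  | succ k ih =>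
    intro pre hlen
    rw [k_permutacoes_go.eq_def]
    rw [if_neg (by omega)]
    rw [k_permutacoes.eq_def]
    rw [if_neg (by omega), if_neg (by omega)]
    rw [flatMap_attach_val itens (fun i => if i ∈ pre then [] else k_permutacoes_go itens n (pre ++ [i]))]
    rw [List.filter_flatMap, List.map_flatMap]
    have hkk : ((k + 1 : Nat) : Int) - 1 = (k : Int) := by push_cast; ring
    rw [hkk]
    congr 1
    funext i
    by_cases hi : i ∈ pre
    · rw [if_pos hi]
      have hnil : List.filter (fun kp => pre.all (fun p => !decide (p ∈ kp)))
          (List.map (fun kp => i :: kp)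
            (List.filter (fun kp => !decide (i ∈ kp)) (k_permutacoes itens (k : Int)))) = [] := by
        apply List.filter_eq_nil_iff.mpr
        intro x hx
        rcases List.mem_map.mp hx with ⟨kp, _, rfl⟩
        intro hall
        rw [List.all_eq_true] at hall
        have := hall i hi
        simp at this
      rw [hnil, List.map_nil]
    · rw [if_neg hi, ih (pre ++ [i]) (by push_cast at hlen ⊢; simp; omega)]
      rw [List.filter_map, List.filter_filter, List.map_map]
      congr 1
      · funext kp; simp
      · apply List.filter_congr
        intro kp _
        have hne : ∀ p ∈ pre, (p ∈ i :: kp) ↔ (p ∈ kp) := by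
          intro p hp
          have : p ≠ i := fun e => hi (e ▸ hp)
          simp [List.mem_cons, this]
        rw [Bool.eq_iff_iff]
        simp only [Function.comp, List.all_append, List.all_cons, List.all_nil, Bool.and_true,
          Bool.and_eq_true, List.all_eq_true, Bool.not_eq_eq_eq_not, Bool.not_true,
          decide_eq_false_iff_not]
        constructor
        · rintro ⟨h1, h2⟩
          exact ⟨fun p hp => fun hm => h1 p hp ((hne p hp).mp hm), h2⟩
        · rintro ⟨h1, h2⟩
          exact ⟨fun p hp => fun hm => h1 p hp ((hne p hp).mpr hm), h2⟩

-- ===== VERDICT (by name: the statement is the Claim_ definition above) =====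
theorem k_permutacoes_spec : Claim_equal_k_permutacoes := by
  intro itens n _ hpre
  unfold Spec_k_permutacoes k_permutacoes_alt
  rw [go_eq itens n n.toNat [] (by simp [Int.toNat_of_nonneg hpre])]
  simp [Int.toNat_of_nonneg hpre]
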